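-- pv_equiv track=rewrite | github.com/jbert/aoc-2024 | d17.py | filter_option_pair
-- ===== SOURCE A (Python) =====
-- trio = tuple[int, int, int]
--
-- def options_match(a: trio, b: trio) -> bool:
--     return a[1] == b[0] and a[2] == b[1]
--
-- def filter_option_pair(aos: set[trio], bos: set[trio]) -> tuple[set[trio], set[trio]]:
--     if len(aos) == 0 or len(bos) == 0:
--         raise RuntimeError(f'zero input')
--     reta = set()
--     retb = set()
--     for ao in aos:
--         for bo in bos:
--             if options_match(ao, bo):
--                 reta.add(ao)
--                 retb.add(bo)
--     return reta, retb
-- ===== SOURCE B (Python) =====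
-- trio = tuple[int, int, int]
--
-- def filter_option_pair(aos: set[trio], bos: set[trio]) -> tuple[set[trio], set[trio]]:
--     if len(aos) == 0 or len(bos) == 0:
--         raise RuntimeError(f'zero input')
--     # index bos once by their first two components, then one lookup per ao
--     index = {}
--     for bo in bos:
--         index.setdefault((bo[0], bo[1]), []).append(bo)
--     reta = set()
--     retb = set()
--     for ao in aos:
--         bucket = index.get((ao[1], ao[2]))
--         if bucket is not None:
--             reta.add(ao)
--             retb.update(bucket)
--     return reta, retb
-- ===== Notes on version B (the rewrite author's own statement) =====
-- stated objective: faster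
-- what changed: B builds a dictionary indexing bos by (bo[0],bo[1]) once and does a single lookup per ao, replacing A's nested scan of bos for every ao.
import Mathlib
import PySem

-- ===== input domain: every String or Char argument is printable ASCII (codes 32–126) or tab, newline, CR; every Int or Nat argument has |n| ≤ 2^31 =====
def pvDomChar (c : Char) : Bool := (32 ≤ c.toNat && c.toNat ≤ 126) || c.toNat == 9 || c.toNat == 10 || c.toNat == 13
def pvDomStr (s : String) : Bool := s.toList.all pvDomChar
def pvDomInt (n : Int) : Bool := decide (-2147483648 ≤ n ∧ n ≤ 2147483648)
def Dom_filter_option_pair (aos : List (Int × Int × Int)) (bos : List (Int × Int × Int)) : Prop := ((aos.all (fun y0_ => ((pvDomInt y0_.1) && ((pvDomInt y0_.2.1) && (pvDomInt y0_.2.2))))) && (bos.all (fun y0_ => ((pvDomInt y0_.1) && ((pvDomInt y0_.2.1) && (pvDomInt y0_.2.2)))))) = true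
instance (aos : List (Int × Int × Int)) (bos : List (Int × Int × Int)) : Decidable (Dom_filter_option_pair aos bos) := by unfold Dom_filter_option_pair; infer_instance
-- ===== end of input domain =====

-- B replaces A's nested scan of bos for every ao by a dictionary indexing bos by (bo[0],bo[1]),
-- built once, with a single lookup per ao (objective: faster, O(n+m) instead of O(n*m)).
-- Outputs are Python sets; the equivalence proved is about the port's insertion-order lists.

-- ===== PORT A =====
def options_match (a : Int × Int × Int) (b : Int × Int × Int) : Bool :=
  a.2.1 == b.1 && a.2.2 == b.2.1

def filter_option_pair (aos : List (Int × Int × Int)) (bos : List (Int × Int × Int)) : (List (Int × Int × Int)) × (List (Int × Int × Int)) :=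
  aos.foldl (fun st ao =>
    bos.foldl (fun st bo =>
      if options_match ao bo then (PySem.Set.add st.1 ao, PySem.Set.add st.2 bo) else st) st)
    ([], [])

-- ===== PORT B =====
-- index = {}; for bo in bos: index.setdefault((bo[0], bo[1]), []).append(bo)
def fop_index (bos : List (Int × Int × Int)) : PySem.Dict (Int × Int) (List (Int × Int × Int)) :=
  bos.foldl (fun d bo => d.modify (bo.1, bo.2.1) [] (· ++ [bo])) PySem.Dict.empty

def filter_option_pair_alt (aos : List (Int × Int × Int)) (bos : List (Int × Int × Int)) : (List (Int × Int × Int)) × (List (Int × Int × Int)) :=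
  let index := fop_index bos
  aos.foldl (fun st ao =>
    if index.contains (ao.2.1, ao.2.2) then
      (PySem.Set.add st.1 ao, PySem.Set.update st.2 (index.getD (ao.2.1, ao.2.2) []))
    else st)
    ([], [])

-- ===== PRECONDITION & SPEC =====
-- Pre_ excludes exactly the inputs where the Python A raises RuntimeError: an empty aos or bos.
def Pre_filter_option_pair (aos : List (Int × Int × Int)) (bos : List (Int × Int × Int)) : Prop :=
  aos ≠ [] ∧ bos ≠ []
instance (aos : List (Int × Int × Int)) (bos : List (Int × Int × Int)) : Decidable (Pre_filter_option_pair aos bos) := by unfold Pre_filter_option_pair; infer_instance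

def pvWitness_filter_option_pair : (List (Int × Int × Int)) × (List (Int × Int × Int)) :=
  ([(1, 2, 3)], [(2, 3, 4)])

def Spec_filter_option_pair (aos : List (Int × Int × Int)) (bos : List (Int × Int × Int)) (out : (List (Int × Int × Int)) × (List (Int × Int × Int))) : Prop := out = filter_option_pair_alt aos bos
instance (aos : List (Int × Int × Int)) (bos : List (Int × Int × Int)) (out : (List (Int × Int × Int)) × (List (Int × Int × Int))) : Decidable (Spec_filter_option_pair aos bos out) := by unfold Spec_filter_option_pair; infer_instance

-- ===== CLAIM (what is proved, stated in full; the proofs are below) =====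
def Claim_equal_filter_option_pair : Prop := ∀ (aos : List (Int × Int × Int)) (bos : List (Int × Int × Int)), Dom_filter_option_pair aos bos → Pre_filter_option_pair aos bos → Spec_filter_option_pair aos bos (filter_option_pair aos bos)

-- ===== LEMMAS AND PROOFS =====

-- the bucket stored under key k is exactly the bos whose (bo.1, bo.2.1) equals k, in order
theorem fop_index_getD (bos : List (Int × Int × Int)) (k : Int × Int) :
    (fop_index bos).getD k [] = bos.filter (fun bo => (bo.1, bo.2.1) == k) := by
  have h := PySem.Dict.getD_foldl_modify_append
    (bos.map (fun bo => ((bo.1, bo.2.1), bo))) PySem.Dict.empty k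
  rw [List.foldl_map] at h
  simp only [List.filter_map, Function.comp_def, List.map_map] at h
  simpa [fop_index] using h

theorem fop_index_contains (bos : List (Int × Int × Int)) (k : Int × Int) :
    (fop_index bos).contains k = true ↔ ∃ bo ∈ bos, (bo.1, bo.2.1) = k := by
  unfold fop_index
  rw [PySem.Dict.contains_iff_mem_keys,
    PySem.Dict.keys_foldl_modify_key bos (fun bo => (bo.1, bo.2.1)) [] (fun _ bo => (· ++ [bo])) PySem.Dict.empty]
  simp [PySem.Set.mem_update, PySem.Dict.keys_empty]

-- the predicates of A's inner test and B's index key agree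
theorem match_eq_key (ao bo : Int × Int × Int) :
    options_match ao bo = ((bo.1, bo.2.1) == (ao.2.1, ao.2.2)) := by
  rw [Bool.eq_iff_iff]
  show _ ↔ (bo.1 == ao.2.1 && bo.2.1 == ao.2.2) = true
  simp [options_match]
  omega

-- A's inner loop over bos, from any state, equals B's one bucket step
theorem inner_loop_eq (ao : Int × Int × Int) (bos : List (Int × Int × Int))
    (st : (List (Int × Int × Int)) × (List (Int × Int × Int))) :
    bos.foldl (fun st bo =>
      if options_match ao bo then (PySem.Set.add st.1 ao, PySem.Set.add st.2 bo) else st) st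
    = (if (bos.filter (fun bo => options_match ao bo)) = [] then st
       else (PySem.Set.add st.1 ao, PySem.Set.update st.2 (bos.filter (fun bo => options_match ao bo)))) := by
  induction bos generalizing st with
  | nil => simp
  | cons bo rest ih =>
    by_cases hm : options_match ao bo = true
    · simp only [List.foldl_cons, List.filter_cons, hm, if_pos]
      rw [ih, if_neg (List.cons_ne_nil bo _), PySem.Set.update_cons]
      by_cases hr : rest.filter (fun b => options_match ao b) = []
      · simp [hr, PySem.Set.update]
      · have : PySem.Set.add (PySem.Set.add st.1 ao) ao = PySem.Set.add st.1 ao :=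
          PySem.Set.add_of_mem (by simp [PySem.Set.mem_add])
        simp only [hr, this, reduceIte]
    · simp only [List.foldl_cons, List.filter_cons, hm]
      exact ih st

theorem step_eq (bos : List (Int × Int × Int)) (ao : Int × Int × Int)
    (st : (List (Int × Int × Int)) × (List (Int × Int × Int))) :
    bos.foldl (fun st bo =>
      if options_match ao bo then (PySem.Set.add st.1 ao, PySem.Set.add st.2 bo) else st) st
    = (if (fop_index bos).contains (ao.2.1, ao.2.2) then
        (PySem.Set.add st.1 ao, PySem.Set.update st.2 ((fop_index bos).getD (ao.2.1, ao.2.2) []))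
      else st) := by
  rw [inner_loop_eq, fop_index_getD]
  have hf : bos.filter (fun bo => options_match ao bo)
      = bos.filter (fun bo => (bo.1, bo.2.1) == (ao.2.1, ao.2.2)) :=
    List.filter_congr (fun bo _ => match_eq_key ao bo)
  rw [hf]
  by_cases hc : (fop_index bos).contains (ao.2.1, ao.2.2) = true
  · have := (fop_index_contains bos (ao.2.1, ao.2.2)).1 hc
    obtain ⟨bo, hmem, hk⟩ := this
    have hne : bos.filter (fun bo => (bo.1, bo.2.1) == (ao.2.1, ao.2.2)) ≠ [] := by
      intro hnil
      have := List.filter_eq_nil_iff.1 hnil bo hmem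
      simp [hk] at this
    simp [hc, hne]
  · have hnil : bos.filter (fun bo => (bo.1, bo.2.1) == (ao.2.1, ao.2.2)) = [] := by
      rw [List.filter_eq_nil_iff]
      intro bo hmem hbeq
      exact hc ((fop_index_contains bos (ao.2.1, ao.2.2)).2 ⟨bo, hmem, by simpa using hbeq⟩)
    simp [hc, hnil]

-- ===== VERDICT (by name: the statement is the Claim_ definition above) =====
theorem filter_option_pair_spec : Claim_equal_filter_option_pair := by
  intro aos bos hd hp
  clear hd hp
  unfold Spec_filter_option_pair filter_option_pair filter_option_pair_alt
  simp only []
  generalize (([], []) : (List (Int × Int × Int)) × (List (Int × Int × Int))) = st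
  induction aos generalizing st with
  | nil => rfl
  | cons ao rest ih =>
    simp only [List.foldl_cons]
    rw [step_eq, ih]
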